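-- pv_equiv track=rewrite | github.com/grimmsgadgets-cmyk/actortracker | app.py | _platforms_for_question
-- ===== SOURCE A (Python) =====
-- def _platforms_for_question(question_text: str) -> list[str]:
--     lowered = question_text.lower()
--     platforms: list[str] = []
--     if any(token in lowered for token in ('phish', 'email')):
--         platforms.extend(['M365', 'Email Gateway'])
--     if any(token in lowered for token in ('cve', 'vpn', 'edge', 'exploit')):
--         platforms.append('Firewall/VPN')
--     if any(token in lowered for token in ('powershell', 'wmi', 'scheduled task')):
--         platforms.append('Windows Event Logs')
--     if any(token in lowered for token in ('dns', 'domain', 'c2', 'beacon')):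
--         platforms.append('DNS/Proxy')
--     if any(token in lowered for token in ('hash', 'file', 'process', 'command line')):
--         platforms.append('EDR')
--     if not platforms:
--         platforms.append('Windows Event Logs')
--     deduped: list[str] = []
--     for platform in platforms:
--         if platform not in deduped:
--             deduped.append(platform)
--     return deduped
-- ===== SOURCE B (Python) =====
-- _TOKEN_CATEGORY = {
--     'phish': 0, 'email': 0,
--     'cve': 1, 'vpn': 1, 'edge': 1, 'exploit': 1,
--     'powershell': 2, 'wmi': 2, 'scheduled task': 2,
--     'dns': 3, 'domain': 3, 'c2': 3, 'beacon': 3,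
--     'hash': 4, 'file': 4, 'process': 4, 'command line': 4,
-- }
-- _LABELS = [['M365', 'Email Gateway'], ['Firewall/VPN'],
--            ['Windows Event Logs'], ['DNS/Proxy'], ['EDR']]
--
-- def _platforms_for_question(question_text: str) -> list[str]:
--     lowered = question_text.lower()
--     matched = {cat for tok, cat in _TOKEN_CATEGORY.items() if tok in lowered}
--     out = [label for cat in sorted(matched) for label in _LABELS[cat]]
--     return out if out else ['Windows Event Logs']
-- ===== Notes on version B (the rewrite author's own statement) =====
-- stated objective: alternative
-- what changed: B replaces A's five hard-coded if-branches plus dedup loop by a flat token->category-index dictionary scanned once into a SET of matched category indices, then emits each category's labels in ascending index order (with the empty-set default afterward); correctness relies on the category order coinciding with A's branch order and the labels being pairwise distinct.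
import Mathlib
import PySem

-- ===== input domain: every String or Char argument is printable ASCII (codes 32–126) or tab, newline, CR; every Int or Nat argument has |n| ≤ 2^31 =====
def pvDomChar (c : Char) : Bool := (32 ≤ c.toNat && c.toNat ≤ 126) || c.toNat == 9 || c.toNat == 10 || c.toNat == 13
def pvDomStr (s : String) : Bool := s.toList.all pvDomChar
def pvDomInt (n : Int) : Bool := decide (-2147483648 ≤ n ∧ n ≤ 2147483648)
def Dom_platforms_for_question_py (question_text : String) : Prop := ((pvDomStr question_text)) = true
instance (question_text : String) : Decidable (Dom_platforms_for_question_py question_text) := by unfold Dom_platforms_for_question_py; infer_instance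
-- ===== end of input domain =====

-- B replaces the five hard-coded branches by a flat token->category-index map, collects the
-- SET of matched category indices, then emits the labels per ascending index; objective: alternative.


-- ===== PORT A =====
-- the final dedup loop of A: for platform in platforms: if platform not in deduped: deduped.append(platform)
def pvDedupLoop (platforms : List String) (deduped : List String) : List String :=
  match platforms with
  | [] => deduped
  | p :: rest => pvDedupLoop rest (if deduped.contains p then deduped else deduped ++ [p])

def platforms_for_question_py (question_text : String) : List String :=
  let lowered := PySem.Str.lower question_text
  let platforms : List String := []
  let platforms := if ["phish", "email"].any (fun token => PySem.Str.isIn token lowered)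
                   then platforms ++ ["M365", "Email Gateway"] else platforms
  let platforms := if ["cve", "vpn", "edge", "exploit"].any (fun token => PySem.Str.isIn token lowered)
                   then platforms ++ ["Firewall/VPN"] else platforms
  let platforms := if ["powershell", "wmi", "scheduled task"].any (fun token => PySem.Str.isIn token lowered)
                   then platforms ++ ["Windows Event Logs"] else platforms
  let platforms := if ["dns", "domain", "c2", "beacon"].any (fun token => PySem.Str.isIn token lowered)
                   then platforms ++ ["DNS/Proxy"] else platforms
  let platforms := if ["hash", "file", "process", "command line"].any (fun token => PySem.Str.isIn token lowered)
                   then platforms ++ ["EDR"] else platforms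
  let platforms := if platforms = [] then platforms ++ ["Windows Event Logs"] else platforms
  pvDedupLoop platforms []

-- ===== PORT B =====
-- B's _TOKEN_CATEGORY: flat token -> category-index map, in insertion order
def pvTokenCats : List (String × Int) :=
  [("phish", 0), ("email", 0),
   ("cve", 1), ("vpn", 1), ("edge", 1), ("exploit", 1),
   ("powershell", 2), ("wmi", 2), ("scheduled task", 2),
   ("dns", 3), ("domain", 3), ("c2", 3), ("beacon", 3),
   ("hash", 4), ("file", 4), ("process", 4), ("command line", 4)]

-- B's _LABELS
def pvLabels : List (List String) :=
  [["M365", "Email Gateway"], ["Firewall/VPN"], ["Windows Event Logs"], ["DNS/Proxy"], ["EDR"]]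

def platforms_for_question_py_alt (question_text : String) : List String :=
  let lowered := PySem.Str.lower question_text
  -- matched = {cat for tok, cat in _TOKEN_CATEGORY.items() if tok in lowered}
  let matched : PySem.Set Int :=
    PySem.Set.ofList ((pvTokenCats.filter (fun p => PySem.Str.isIn p.1 lowered)).map Prod.snd)
  -- out = [label for cat in sorted(matched) for label in _LABELS[cat]]
  -- (_LABELS[cat] never raises: every category index is 0..4, so the `.getD []` branch is unreachable)
  let out := (PySem.List.sorted matched (fun x => x) false).flatMap
               (fun c => (PySem.List.pyGet? pvLabels c).getD [])
  if out = [] then ["Windows Event Logs"] else out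

-- ===== PRECONDITION & SPEC =====
def Spec_platforms_for_question_py (question_text : String) (out : List String) : Prop := out = platforms_for_question_py_alt question_text
instance (question_text : String) (out : List String) : Decidable (Spec_platforms_for_question_py question_text out) := by unfold Spec_platforms_for_question_py; infer_instance

-- ===== CLAIM =====
def Claim_equal_platforms_for_question_py : Prop := ∀ (question_text : String), Dom_platforms_for_question_py question_text → Spec_platforms_for_question_py question_text (platforms_for_question_py question_text)

-- ===== LEMMAS AND PROOFS =====
-- every category index in the token map is 0..4
theorem pv_cats_range : ∀ p ∈ pvTokenCats, p.2 = 0 ∨ p.2 = 1 ∨ p.2 = 2 ∨ p.2 = 3 ∨ p.2 = 4 := by decide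

-- sorted(matched) is exactly the ascending list of category indices whose token group matched
theorem pv_sorted_matched (lowered : String) :
    PySem.List.sorted
      (PySem.Set.ofList ((pvTokenCats.filter (fun p => PySem.Str.isIn p.1 lowered)).map Prod.snd))
      (fun x => x) false
    = ([0, 1, 2, 3, 4] : List Int).filter
        (fun c => (pvTokenCats.filter (fun p => p.2 == c)).any (fun p => PySem.Str.isIn p.1 lowered)) := by
  apply PySem.List.sorted_eq_of_perm_of_pairwise_lt
  · refine (List.perm_ext_iff_of_nodup (List.Nodup.filter _ (by decide)) (PySem.Set.nodup_ofList _)).mpr ?_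
    intro x
    rw [PySem.Set.mem_ofList]
    constructor
    · intro hx
      obtain ⟨hx5, hpred⟩ := List.mem_filter.mp hx
      obtain ⟨p, hp, hin⟩ := List.any_eq_true.mp hpred
      obtain ⟨hpm, hpx⟩ := List.mem_filter.mp hp
      exact List.mem_map.mpr ⟨p, List.mem_filter.mpr ⟨hpm, hin⟩, by simpa using hpx⟩
    · intro hx
      obtain ⟨p, hp, hpx⟩ := List.mem_map.mp hx
      obtain ⟨hpm, hin⟩ := List.mem_filter.mp hp
      refine List.mem_filter.mpr ⟨?_, ?_⟩
      · rcases pv_cats_range p hpm with h|h|h|h|h <;> subst hpx <;> simp [h]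
      · exact List.any_eq_true.mpr ⟨p, List.mem_filter.mpr ⟨hpm, by simp [hpx]⟩, hin⟩
  · exact List.Pairwise.filter _ (by decide)

-- both results as a function of the five group-match booleans
set_option maxHeartbeats 2000000 in
theorem pv_key (lowered : String) :
    (let platforms : List String := []
     let platforms := if ["phish", "email"].any (fun token => PySem.Str.isIn token lowered)
                      then platforms ++ ["M365", "Email Gateway"] else platforms
     let platforms := if ["cve", "vpn", "edge", "exploit"].any (fun token => PySem.Str.isIn token lowered)
                      then platforms ++ ["Firewall/VPN"] else platforms
     let platforms := if ["powershell", "wmi", "scheduled task"].any (fun token => PySem.Str.isIn token lowered)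
                      then platforms ++ ["Windows Event Logs"] else platforms
     let platforms := if ["dns", "domain", "c2", "beacon"].any (fun token => PySem.Str.isIn token lowered)
                      then platforms ++ ["DNS/Proxy"] else platforms
     let platforms := if ["hash", "file", "process", "command line"].any (fun token => PySem.Str.isIn token lowered)
                      then platforms ++ ["EDR"] else platforms
     let platforms := if platforms = [] then platforms ++ ["Windows Event Logs"] else platforms
     pvDedupLoop platforms []) =
    (let matched : PySem.Set Int :=
       PySem.Set.ofList ((pvTokenCats.filter (fun p => PySem.Str.isIn p.1 lowered)).map Prod.snd)
     let out := (PySem.List.sorted matched (fun x => x) false).flatMap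
                  (fun c => (PySem.List.pyGet? pvLabels c).getD [])
     if out = [] then ["Windows Event Logs"] else out) := by
  simp only [pv_sorted_matched]
  cases h1 : (PySem.Str.isIn "phish" lowered || PySem.Str.isIn "email" lowered) <;>
  cases h2 : (PySem.Str.isIn "cve" lowered || (PySem.Str.isIn "vpn" lowered || (PySem.Str.isIn "edge" lowered || PySem.Str.isIn "exploit" lowered))) <;>
  cases h3 : (PySem.Str.isIn "powershell" lowered || (PySem.Str.isIn "wmi" lowered || PySem.Str.isIn "scheduled task" lowered)) <;>
  cases h4 : (PySem.Str.isIn "dns" lowered || (PySem.Str.isIn "domain" lowered || (PySem.Str.isIn "c2" lowered || PySem.Str.isIn "beacon" lowered))) <;>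
  cases h5 : (PySem.Str.isIn "hash" lowered || (PySem.Str.isIn "file" lowered || (PySem.Str.isIn "process" lowered || PySem.Str.isIn "command line" lowered))) <;>
    simp_all [pvTokenCats, pvLabels, pvDedupLoop, PySem.List.pyGet?, PySem.List.pyIdx?]

-- ===== VERDICT =====
theorem platforms_for_question_py_spec : Claim_equal_platforms_for_question_py := by
  intro q _
  show platforms_for_question_py q = platforms_for_question_py_alt q
  unfold platforms_for_question_py platforms_for_question_py_alt
  exact pv_key (PySem.Str.lower q)
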